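-- pv_equiv track=rewrite | github.com/ProphetSunboy/python_tasks | maximum_enemy_forts_that_can_be_captured.py | captureForts
-- ===== SOURCE A (Python) =====
-- from typing import List
--
-- def captureForts(forts: List[int]) -> int:
--     """
--     Calculates the maximum number of enemy forts that can be captured in one move.
--
--     You are given a 0-indexed integer list `forts` of length n, where:
--         - `forts[i] == -1` means the i-th position is empty (no fort),
--         - `forts[i] == 0` means there is an enemy fort at the i-th position,
--         - `forts[i] == 1` means your fort is at the i-th position.
--
--     You can move your army from a position with your fort (`1`) to an empty
--     position (`-1`), only traversing through enemy forts (`0`).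
--     For a move from index i to j, all positions between i and j (exclusive)
--     ust be enemy forts, i.e., for all k with min(i, j) < k < max(i, j): forts[k] == 0.
--     All enemy forts passed over are captured.
--
--     Returns the maximum number of enemy forts that can be captured in a single valid move.
--     If no move is possible, or you do not own any forts, returns 0.
--
--     Args:
--         forts (List[int]): List describing fort positions.
--
--     Returns:
--         int: Maximum number of enemy forts that can be captured in one move.
--
--     Example:
--         >>> captureForts([1, 0, 0, -1, 0, 1])
--         2
--
--     Time Complexity: O(n), where n is the size of forts.
--     Space Complexity: O(1)
--
--     LeetCode: Beats 100% of submissions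
--     """
--     n = len(forts)
--     max_capture = 0
--
--     for i in range(n):
--         if forts[i] == 1:
--             flag = True
--             right_capture = 0
--
--             for j in range(i + 1, n):
--                 if forts[j] == 0:
--                     right_capture += 1
--                 elif forts[j] == -1:
--                     flag = False
--                     break
--                 else:
--                     break
--             if flag:
--                 right_capture = 0
--
--             left_capture = 0
--             flag = True
--
--             for j in range(i - 1, -1, -1):
--                 if forts[j] == 0:
--                     left_capture += 1
--                 elif forts[j] == -1:
--                     flag = False
--                     break
--                 else:
--                     break
--             if flag:
--                 left_capture = 0
--             max_capture = max(max_capture, right_capture, left_capture)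
--
--     return max_capture
-- ===== SOURCE B (Python) =====
-- def captureForts(forts):
--     best = 0
--     prev = None
--     gap = 0
--     for v in forts:
--         if v == 0:
--             gap += 1
--         else:
--             if (prev, v) in ((1, -1), (-1, 1)):
--                 best = max(best, gap)
--             prev = v
--             gap = 0
--     return best
-- ===== Notes on version B (the rewrite author's own statement) =====
-- stated objective: simpler
-- what changed: Replaces A's per-position bidirectional zero-scans from every `1` by a single left-to-right pass that keeps only the most recent non-zero marker and the length of the zero run since it, banking the gap whenever a 1/-1 pair of adjacent markers is seen.
import Mathlib
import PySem

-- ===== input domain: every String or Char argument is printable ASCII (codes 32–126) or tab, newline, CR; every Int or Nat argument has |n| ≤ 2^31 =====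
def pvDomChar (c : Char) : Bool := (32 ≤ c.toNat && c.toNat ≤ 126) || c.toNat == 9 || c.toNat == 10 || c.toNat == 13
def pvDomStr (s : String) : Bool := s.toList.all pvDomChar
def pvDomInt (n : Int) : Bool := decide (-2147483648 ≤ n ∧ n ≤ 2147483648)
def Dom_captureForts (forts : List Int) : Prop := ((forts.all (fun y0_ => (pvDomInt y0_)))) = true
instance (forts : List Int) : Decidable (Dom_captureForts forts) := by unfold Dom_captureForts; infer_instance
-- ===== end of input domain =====

-- B is a single left-to-right pass (no per-position rescans) instead of A's per-`1` bidirectional scans; objective: simpler.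

-- ===== PORT A =====
-- A's inner scan (both the `for j in range(i+1,n)` and the `for j in range(i-1,-1,-1)` loop,
-- the latter applied to the reversed prefix): count zeros, flag = False iff the scan broke at -1.
def scanStepA : List Int → Int × Bool
  | [] => (0, true)                       -- loop ran off the end: flag stays True
  | v :: rest =>
    if v = 0 then
      let r := scanStepA rest
      (r.1 + 1, r.2)                      -- right_capture += 1, continue
    else if v = -1 then (0, false)        -- flag = False; break
    else (0, true)                        -- break with flag still True

-- "if flag: capture = 0" after the scan
def capValA (l : List Int) : Int :=
  let r := scanStepA l
  if r.2 then 0 else r.1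

-- outer `for i in range(n)`: walk the list keeping the reversed prefix forts[:i]
-- (the left scan iterates j = i-1 .. 0, i.e. exactly that reversed prefix)
def outerA (best : Int) (revpre : List Int) : List Int → Int
  | [] => best
  | v :: rest =>
    if v = 1 then
      let rc := capValA rest
      let lc := capValA revpre
      outerA (max (max best rc) lc) (v :: revpre) rest
    else outerA best (v :: revpre) rest

def captureForts (forts : List Int) : Int := outerA 0 [] forts

-- ===== PORT B =====
-- one pass: prev = most recent non-zero value (None initially), gap = zeros since it
def goB (prev : Option Int) (gap best : Int) : List Int → Int
  | [] => best
  | v :: rest =>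
    if v = 0 then goB prev (gap + 1) best rest
    else
      let best' := if (prev = some 1 ∧ v = -1) ∨ (prev = some (-1) ∧ v = 1) then max best gap else best
      goB (some v) 0 best' rest

def captureForts_alt (forts : List Int) : Int := goB none 0 0 forts

-- ===== PRECONDITION & SPEC =====
def Spec_captureForts (forts : List Int) (out : Int) : Prop := out = captureForts_alt forts
instance (forts : List Int) (out : Int) : Decidable (Spec_captureForts forts out) := by unfold Spec_captureForts; infer_instance

-- ===== CLAIM (what is proved, stated in full; the proofs are below) =====
def Claim_equal_captureForts : Prop := ∀ (forts : List Int), Dom_captureForts forts → Spec_captureForts forts (captureForts forts)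

-- ===== LEMMAS AND PROOFS =====

-- first non-zero entry of l (B's `prev` after consuming l in reverse), and the zero run before it (B's `gap`)
def prevOf (l : List Int) : Option Int := (l.dropWhile (· == 0)).head?
def gapOf (l : List Int) : Int := ((l.takeWhile (· == 0)).length : Int)

-- the rightward capture A has already credited at the last `1` but B has not yet banked
def pend (revpre l : List Int) : Int :=
  if prevOf revpre = some 1 ∧ prevOf l = some (-1) then gapOf revpre + gapOf l else 0

lemma prevOf_cons_zero (l : List Int) : prevOf (0 :: l) = prevOf l := by
  simp [prevOf]

lemma gapOf_cons_zero (l : List Int) : gapOf (0 :: l) = gapOf l + 1 := by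
  simp [gapOf]

lemma prevOf_cons_ne (v : Int) (l : List Int) (h : v ≠ 0) : prevOf (v :: l) = some v := by
  simp [prevOf, h]

lemma gapOf_cons_ne (v : Int) (l : List Int) (h : v ≠ 0) : gapOf (v :: l) = 0 := by
  simp [gapOf, h]

lemma gapOf_nonneg (l : List Int) : 0 ≤ gapOf l := by
  simp [gapOf]

lemma pend_nonneg (revpre l : List Int) : 0 ≤ pend revpre l := by
  rw [pend]
  split_ifs
  · have := gapOf_nonneg revpre; have := gapOf_nonneg l; omega
  · exact le_refl 0

lemma scanStepA_eq (l : List Int) :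
    scanStepA l = (gapOf l, decide (prevOf l ≠ some (-1))) := by
  induction l with
  | nil => simp [scanStepA, gapOf, prevOf]
  | cons v rest ih =>
    by_cases h0 : v = 0
    · subst h0
      simp [scanStepA, ih, prevOf_cons_zero, gapOf_cons_zero]
    · by_cases hm : v = -1
      · subst hm
        simp [scanStepA, prevOf_cons_ne _ _ (by norm_num : (-1 : Int) ≠ 0),
          gapOf_cons_ne _ _ (by norm_num : (-1 : Int) ≠ 0)]
      · simp [scanStepA, h0, prevOf_cons_ne _ _ h0, gapOf_cons_ne _ _ h0, hm]

lemma capValA_eq (l : List Int) :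
    capValA l = if prevOf l = some (-1) then gapOf l else 0 := by
  rw [capValA, scanStepA_eq]
  by_cases h : prevOf l = some (-1) <;> simp [h]

lemma main_lemma (l : List Int) : ∀ (revpre : List Int) (b : Int), 0 ≤ b →
    outerA (max b (pend revpre l)) revpre l = goB (prevOf revpre) (gapOf revpre) b l := by
  induction l with
  | nil =>
    intro revpre b hb
    have h0 : pend revpre [] = 0 := by simp [pend, prevOf]
    have hb0 : max b 0 = b := by omega
    rw [h0, hb0]
    simp [outerA, goB]
  | cons v rest ih =>
    intro revpre b hb
    by_cases h0 : v = 0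
    · subst h0
      have hp : pend revpre (0 :: rest) = pend (0 :: revpre) rest := by
        rw [pend, pend, prevOf_cons_zero, gapOf_cons_zero, prevOf_cons_zero, gapOf_cons_zero]
        split_ifs <;> omega
      have hgo : goB (prevOf revpre) (gapOf revpre) b (0 :: rest)
          = goB (prevOf (0 :: revpre)) (gapOf (0 :: revpre)) b rest := by
        rw [prevOf_cons_zero, gapOf_cons_zero]
        simp [goB]
      rw [hgo, ← ih (0 :: revpre) b hb, hp]
      simp [outerA]
    · -- v ≠ 0 : A's outer branch and B's non-zero branch
      have hprev : prevOf (v :: revpre) = some v := prevOf_cons_ne v revpre h0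
      have hgap : gapOf (v :: revpre) = 0 := gapOf_cons_ne v revpre h0
      by_cases h1 : v = 1
      · subst h1
        have hpend0 : pend revpre (1 :: rest) = 0 := by
          rw [pend, prevOf_cons_ne _ _ (one_ne_zero)]
          simp
        have hlc : capValA revpre = if prevOf revpre = some (-1) then gapOf revpre else 0 :=
          capValA_eq revpre
        have hrc : capValA rest = pend (1 :: revpre) rest := by
          rw [capValA_eq, pend, hprev, hgap]
          by_cases h : prevOf rest = some (-1) <;> simp [h]
        have hb' : 0 ≤ max b (capValA revpre) := le_max_of_le_left hb
        have key := ih (1 :: revpre) (max b (capValA revpre)) hb'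
        rw [hprev, hgap] at key
        have harg : max (max (max b (pend revpre (1 :: rest))) (capValA rest)) (capValA revpre)
            = max (max b (capValA revpre)) (pend (1 :: revpre) rest) := by
          rw [hpend0, hrc]; omega
        have lhs : outerA (max b (pend revpre (1 :: rest))) revpre (1 :: rest)
            = outerA (max (max b (capValA revpre)) (pend (1 :: revpre) rest)) (1 :: revpre) rest := by
          rw [← harg]; simp [outerA]
        rw [lhs, key]
        -- B side: its updated best equals  max b (capValA revpre)
        by_cases hpm : prevOf revpre = some (-1)
        · rw [hlc]; simp [goB, hpm]
        · have hcond : ¬ ((prevOf revpre = some 1 ∧ (1 : Int) = -1)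
              ∨ (prevOf revpre = some (-1) ∧ (1 : Int) = 1)) := by
            rintro (⟨_, h⟩ | ⟨h, _⟩)
            · norm_num at h
            · exact hpm h
          have hz : (if prevOf revpre = some (-1) then gapOf revpre else 0) = 0 := if_neg hpm
          have hmb : max b 0 = b := by omega
          rw [hlc, hz, hmb]
          simp [goB, hpm]
      · -- v ≠ 0, v ≠ 1 : A skips; B updates prev (banking the pending gap iff v = -1 after a 1)
        have hpend' : pend (v :: revpre) rest = 0 := by
          rw [pend, hprev]
          simp
          intro h; exact absurd h h1
        have hX : 0 ≤ pend revpre (v :: rest) := pend_nonneg _ _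
        have key := ih (v :: revpre) (max b (pend revpre (v :: rest))) (le_max_of_le_left hb)
        rw [hprev, hgap, hpend'] at key
        have hmax0 : max (max b (pend revpre (v :: rest))) 0 = max b (pend revpre (v :: rest)) := by
          omega
        rw [hmax0] at key
        have lhs : outerA (max b (pend revpre (v :: rest))) revpre (v :: rest)
            = outerA (max b (pend revpre (v :: rest))) (v :: revpre) rest := by
          simp [outerA, h1]
        rw [lhs, key]
        -- B side
        by_cases hm : v = -1
        · subst hm
          by_cases hp1 : prevOf revpre = some 1
          · have hpe : pend revpre (-1 :: rest) = gapOf revpre := by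
              rw [pend, hp1, prevOf_cons_ne _ _ (by norm_num : (-1 : Int) ≠ 0),
                gapOf_cons_ne _ _ (by norm_num : (-1 : Int) ≠ 0)]
              simp
            rw [hpe]
            simp [goB, hp1]
          · have hpe : pend revpre (-1 :: rest) = 0 := by
              rw [pend]; simp [hp1]
            have hmb : max b 0 = b := by omega
            rw [hpe, hmb]
            simp [goB, hp1]
        · have hpe : pend revpre (v :: rest) = 0 := by
            rw [pend, prevOf_cons_ne _ _ h0]
            simp
            intro _ h; exact absurd h hm
          have hmb : max b 0 = b := by omega
          rw [hpe, hmb]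
          have hcond : ¬ ((prevOf revpre = some 1 ∧ v = -1)
              ∨ (prevOf revpre = some (-1) ∧ v = 1)) := by
            rintro (⟨_, h⟩ | ⟨_, h⟩)
            · exact hm h
            · exact h1 h
          simp [goB, h0, hcond]

-- ===== VERDICT (by name: the statement is the Claim_ definition above) =====
theorem captureForts_spec : Claim_equal_captureForts := by
  intro forts _
  show captureForts forts = captureForts_alt forts
  have h := main_lemma forts [] 0 le_rfl
  simpa [captureForts, captureForts_alt, pend, prevOf, gapOf] using h
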